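-- pv_equiv track=rewrite | github.com/piernik-dev/piernik | visual/plot_utils.py | reorder_gridcolorlist
-- ===== SOURCE A (Python) =====
-- def reorder_gridcolorlist(gcolor, maxglev, plotlevels):
--     gaux1 = gcolor.split(',')
--     maxgc = len(gaux1)
--     gaux2 = []
--     ail = 0
--     for il in range(maxglev + 1):
--         if il in plotlevels:
--             gaux2.append(gaux1[ail % maxgc])
--             ail += 1
--         else:
--             gaux2.append('none')
--     return gaux2
-- ===== SOURCE B (Python) =====
-- def reorder_gridcolorlist(gcolor, maxglev, plotlevels):
--     gaux1 = gcolor.split(',')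
--     maxgc = len(gaux1)
--     result = ['none'] * (maxglev + 1)
--     levels = sorted(set(l for l in plotlevels if 0 <= l <= maxglev))
--     for i, lev in enumerate(levels):
--         result[lev] = gaux1[i % maxgc]
--     return result
-- ===== Notes on version B (the rewrite author's own statement) =====
-- stated objective: faster
-- what changed: Instead of scanning every level 0..maxglev and testing 'il in plotlevels' with a running color counter, B pre-fills the result with 'none', computes the sorted de-duplicated in-range levels once via a set, and scatters the cyclic colors directly into their slots.
import Mathlib
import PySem

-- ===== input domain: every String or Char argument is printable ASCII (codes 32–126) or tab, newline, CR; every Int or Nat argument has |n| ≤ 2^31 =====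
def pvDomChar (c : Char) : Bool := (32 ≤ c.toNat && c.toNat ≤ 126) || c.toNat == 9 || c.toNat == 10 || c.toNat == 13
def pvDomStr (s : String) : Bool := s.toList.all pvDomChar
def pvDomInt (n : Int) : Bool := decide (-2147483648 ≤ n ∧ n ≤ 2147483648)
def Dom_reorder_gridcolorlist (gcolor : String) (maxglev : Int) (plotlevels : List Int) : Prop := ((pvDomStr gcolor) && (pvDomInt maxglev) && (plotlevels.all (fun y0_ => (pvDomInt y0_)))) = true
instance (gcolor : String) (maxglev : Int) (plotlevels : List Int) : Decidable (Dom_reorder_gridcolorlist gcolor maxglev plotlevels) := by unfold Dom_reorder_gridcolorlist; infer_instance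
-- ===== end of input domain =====

-- B pre-fills the result with 'none' and scatters the cyclic colors into the
-- sorted de-duplicated in-range levels, replacing A's per-level membership scan
-- with a running counter (objective: faster, measured).

-- ===== PORT A =====
def reorder_gridcolorlist (gcolor : String) (maxglev : Int) (plotlevels : List Int) : List String :=
  let gaux1 := (PySem.Chars.splitOn gcolor.toList ",".toList).map String.mk
  let maxgc : Int := PySem.List.len gaux1
  let r := (PySem.List.pyRange 0 (maxglev + 1) 1).foldl
    (fun (st : List String × Int) il =>
      if il ∈ plotlevels then
        (st.1 ++ [PySem.List.pyGetD gaux1 (PySem.Int.mod st.2 maxgc) ""], st.2 + 1)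
      else
        (st.1 ++ ["none"], st.2)) ([], 0)
  r.1

-- ===== PORT B =====
def reorder_gridcolorlist_alt (gcolor : String) (maxglev : Int) (plotlevels : List Int) : List String :=
  let gaux1 := (PySem.Chars.splitOn gcolor.toList ",".toList).map String.mk
  let maxgc : Int := PySem.List.len gaux1
  let result := PySem.List.pyRepeat ["none"] (maxglev + 1)
  let levels := PySem.List.sorted
    (PySem.Set.ofList (plotlevels.filter (fun l => decide (0 ≤ l) && decide (l ≤ maxglev))))
    (fun x => x) false
  (PySem.List.enumerate levels 0).foldl
    (fun res p => PySem.List.pySetD res p.2 (PySem.List.pyGetD gaux1 (PySem.Int.mod p.1 maxgc) "")) result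

-- ===== PRECONDITION & SPEC =====
def Spec_reorder_gridcolorlist (gcolor : String) (maxglev : Int) (plotlevels : List Int) (out : List String) : Prop := out = reorder_gridcolorlist_alt gcolor maxglev plotlevels
instance (gcolor : String) (maxglev : Int) (plotlevels : List Int) (out : List String) : Decidable (Spec_reorder_gridcolorlist gcolor maxglev plotlevels out) := by unfold Spec_reorder_gridcolorlist; infer_instance

-- ===== CLAIM (what is proved, stated in full; the proofs are below) =====
def Claim_equal_reorder_gridcolorlist : Prop := ∀ (gcolor : String) (maxglev : Int) (plotlevels : List Int), Dom_reorder_gridcolorlist gcolor maxglev plotlevels → Spec_reorder_gridcolorlist gcolor maxglev plotlevels (reorder_gridcolorlist gcolor maxglev plotlevels)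

-- ===== LEMMAS AND PROOFS =====

-- counting elements below a bound grows by 1 exactly at a member of a nodup list
theorem pvCountP_lt_succ (L : List Int) (hnd : L.Nodup) (a : Int) :
    L.countP (fun x => decide (x < a + 1)) =
      L.countP (fun x => decide (x < a)) + (if a ∈ L then 1 else 0) := by
  induction L with
  | nil => simp
  | cons x t ih =>
    simp only [List.nodup_cons] at hnd
    simp only [List.countP_cons, ih hnd.2, List.mem_cons]
    by_cases hxa : x = a
    · subst hxa
      simp [hnd.1]
    · have hiff : x < a + 1 ↔ x < a := by omega
      by_cases hat : a ∈ t <;> simp [hat, Ne.symm hxa, hiff] <;> split_ifs <;> omega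

-- A's loop, generalized: starting counter = number of selected levels below a
theorem pvA_loop (pl L : List Int) (gaux1 : List String) (maxgc : Int) (hnd : L.Nodup) (b : Int) :
    ∀ (n : Nat) (a : Int) (acc : List String), (b - a).toNat = n → a ≤ b →
    (∀ il, a ≤ il → il < b → (il ∈ pl ↔ il ∈ L)) →
    (PySem.List.pyRange a b 1).foldl
      (fun (st : List String × Int) il =>
        if il ∈ pl then
          (st.1 ++ [PySem.List.pyGetD gaux1 (PySem.Int.mod st.2 maxgc) ""], st.2 + 1)
        else (st.1 ++ ["none"], st.2))
      (acc, (L.countP (fun x => decide (x < a)) : Int))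
    = (acc ++ (PySem.List.pyRange a b 1).map
        (fun il => if il ∈ L then
            PySem.List.pyGetD gaux1
              (PySem.Int.mod (L.countP (fun x => decide (x < il)) : Int) maxgc) ""
          else "none"),
       (L.countP (fun x => decide (x < b)) : Int)) := by
  intro n
  induction n with
  | zero =>
    intro a acc h0 hab _
    have hba : b = a := by omega
    subst hba
    rw [PySem.List.pyRange_one_eq_nil le_rfl]
    simp
  | succ n ih =>
    intro a acc h0 hab hmem
    have hlt : a < b := by omega
    rw [PySem.List.pyRange_one_cons hlt]
    have hcnt := pvCountP_lt_succ L hnd a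
    by_cases hpl : a ∈ pl
    · have haL : a ∈ L := (hmem a le_rfl hlt).mp hpl
      have hstep : ((L.countP (fun x => decide (x < a)) : Int) + 1)
          = (L.countP (fun x => decide (x < a + 1)) : Int) := by
        rw [hcnt]; simp [haL]
      simp only [List.foldl_cons, List.map_cons, hpl, haL, if_true, hstep]
      rw [ih (a + 1)
            (acc ++ [PySem.List.pyGetD gaux1
              (PySem.Int.mod (L.countP (fun x => decide (x < a)) : Int) maxgc) ""])
            (by omega) (by omega) (fun il h1 h2 => hmem il (by omega) h2)]
      simp [List.append_assoc]
    · have haL : a ∉ L := fun h => hpl ((hmem a le_rfl hlt).mpr h)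
      have hstep : (L.countP (fun x => decide (x < a)) : Int)
          = (L.countP (fun x => decide (x < a + 1)) : Int) := by
        rw [hcnt]; simp [haL]
      simp only [List.foldl_cons, List.map_cons, hpl, haL, if_false]
      rw [hstep, ih (a + 1) (acc ++ ["none"]) (by omega) (by omega)
            (fun il h1 h2 => hmem il (by omega) h2)]
      simp [List.append_assoc]

-- element description of the scatter loop (distinct nonnegative in-range targets)
theorem pvB_get (gaux1 : List String) (maxgc : Int) :
    ∀ (ps : List (Int × Int)) (R : List String),
    (∀ p ∈ ps, 0 ≤ p.2 ∧ p.2 < (R.length : Int)) → (ps.map Prod.snd).Nodup →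
    ∀ (j : Nat),
    (ps.foldl (fun res p =>
        PySem.List.pySetD res p.2 (PySem.List.pyGetD gaux1 (PySem.Int.mod p.1 maxgc) "")) R)[j]? =
      (match ps.find? (fun p => p.2 == (j : Int)) with
       | some p => some (PySem.List.pyGetD gaux1 (PySem.Int.mod p.1 maxgc) "")
       | none => R[j]?) := by
  intro ps
  induction ps with
  | nil => intro R _ _ j; simp
  | cons p t ih =>
    intro R hin hnd j
    have hp := hin p (List.mem_cons_self)
    have hset : PySem.List.pySetD R p.2 (PySem.List.pyGetD gaux1 (PySem.Int.mod p.1 maxgc) "")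
        = R.set p.2.toNat (PySem.List.pyGetD gaux1 (PySem.Int.mod p.1 maxgc) "") :=
      PySem.List.pySetD_of_nonneg R _ hp.1
    simp only [List.map_cons, List.nodup_cons] at hnd
    simp only [List.foldl_cons, hset]
    rw [ih (R.set p.2.toNat (PySem.List.pyGetD gaux1 (PySem.Int.mod p.1 maxgc) ""))
        (fun q hq => by simpa using hin q (List.mem_cons_of_mem _ hq)) hnd.2 j]
    by_cases hpj : p.2 = (j : Int)
    · have hfind : t.find? (fun q => q.2 == (j : Int)) = none := by
        rw [List.find?_eq_none]
        intro q hq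
        simp only [beq_iff_eq]
        intro hq2
        apply hnd.1
        have hq3 : q.2 ∈ t.map Prod.snd := List.mem_map.mpr ⟨q, hq, rfl⟩
        rwa [hq2, ← hpj] at hq3
      rw [hfind]
      have hjp : p.2.toNat = j := by omega
      rw [List.find?_cons_of_pos (by simp [hpj])]
      rw [hjp, List.getElem?_set_self (by omega)]
    · rw [List.find?_cons_of_neg (by simp [hpj])]
      cases hft : t.find? (fun q => q.2 == (j : Int)) with
      | some q => rfl
      | none =>
        rw [List.getElem?_set_ne (by omega)]

-- find? over enumerate of a strictly increasing list locates the counted index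
theorem pvFind_enumerate (L : List Int) :
    ∀ (s j : Int), L.Pairwise (· < ·) → j ∈ L →
    (PySem.List.enumerate L s).find? (fun p => p.2 == j) =
      some (s + (L.countP (fun x => decide (x < j)) : Int), j) := by
  induction L with
  | nil => intro s j _ h; simp at h
  | cons x t ih =>
    intro s j hpw hj
    rw [List.pairwise_cons] at hpw
    rw [PySem.List.enumerate_cons]
    rcases eq_or_ne x j with rfl | hxj
    · have hct : t.countP (fun y => decide (y < x)) = 0 := by
        rw [List.countP_eq_zero]
        intro y hy
        simpa using not_lt.mpr (le_of_lt (hpw.1 y hy))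
      simp [List.countP_cons, hct]
    · have hjt : j ∈ t := by
        rcases List.mem_cons.mp hj with h | h
        · exact absurd h.symm hxj
        · exact h
      have hxlt : x < j := hpw.1 j hjt
      rw [List.find?_cons_of_neg (by simp [hxj]), ih (s + 1) j hpw.2 hjt]
      have hcc : (x :: t).countP (fun y => decide (y < j))
          = t.countP (fun y => decide (y < j)) + 1 := by
        simp [List.countP_cons, hxlt]
      rw [hcc]
      congr 2
      push_cast
      omega

-- the whole equivalence, stated over the open values
theorem reorder_gridcolorlist_spec' (gcolor : String) (maxglev : Int) (plotlevels : List Int) :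
    reorder_gridcolorlist gcolor maxglev plotlevels = reorder_gridcolorlist_alt gcolor maxglev plotlevels := by
  simp only [reorder_gridcolorlist, reorder_gridcolorlist_alt]
  set gaux1 := (PySem.Chars.splitOn gcolor.toList ",".toList).map String.mk with hg
  set maxgc : Int := PySem.List.len gaux1 with hm
  set q : Int → Bool := fun l => decide (0 ≤ l) && decide (l ≤ maxglev) with hq
  set L : List Int := PySem.List.sorted (PySem.Set.ofList (plotlevels.filter q)) (fun x => x) false with hL
  have hLperm : L.Perm (PySem.Set.ofList (plotlevels.filter q)) := PySem.List.sorted_perm _ _ _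
  have hLnd : L.Nodup := hLperm.nodup_iff.mpr (PySem.Set.nodup_ofList _)
  have hLpw : L.Pairwise (· < ·) := PySem.List.sorted_ofList_pairwise_lt _
  have hLmem : ∀ x : Int, x ∈ L ↔ (x ∈ plotlevels ∧ 0 ≤ x ∧ x ≤ maxglev) := by
    intro x
    rw [hL, PySem.List.mem_sorted, PySem.Set.mem_ofList, List.mem_filter, hq]
    simp
  have hLnn : ∀ x ∈ L, 0 ≤ x := fun x hx => ((hLmem x).mp hx).2.1
  by_cases hneg : maxglev + 1 ≤ 0
  · -- empty range, empty result
    have hLnil : L = [] := by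
      have hf : plotlevels.filter q = [] := by
        rw [List.filter_eq_nil_iff]
        intro l _
        simp only [hq, Bool.and_eq_true, decide_eq_true_eq, not_and]
        omega
      rw [hL, hf]
      rfl
    rw [PySem.List.pyRange_one_eq_nil hneg, hLnil]
    simp [PySem.List.pyRepeat_singleton, Int.toNat_of_nonpos hneg, PySem.List.enumerate_nil]
  · push_neg at hneg
    have h0 : (0:Int) ≤ maxglev + 1 := by omega
    -- A's side: the loop is the reference map
    have hcnt0 : ((L.countP (fun x => decide (x < 0)) : Nat) : Int) = (0 : Int) := by
      have hz : L.countP (fun x => decide (x < 0)) = 0 := by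
        rw [List.countP_eq_zero]
        intro x hx
        simpa using not_lt.mpr (hLnn x hx)
      rw [hz]; rfl
    have hA := pvA_loop plotlevels L gaux1 maxgc hLnd (maxglev + 1) (maxglev + 1 - 0).toNat 0 [] rfl h0
      (fun il h1 h2 => by
        rw [hLmem il]
        exact ⟨fun h => ⟨h, h1, by omega⟩, fun h => h.1⟩)
    rw [hcnt0] at hA
    rw [hA, List.nil_append]
    -- B's side: elementwise
    set n : Nat := (maxglev + 1).toNat with hn
    have hRrep : PySem.List.pyRepeat ["none"] (maxglev + 1) = List.replicate n "none" :=
      PySem.List.pyRepeat_singleton _ _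
    rw [hRrep]
    have hRlen : (List.replicate n "none").length = n := List.length_replicate
    apply List.ext_getElem?
    intro j
    rw [pvB_get gaux1 maxgc (PySem.List.enumerate L 0) (List.replicate n "none")
        (fun p hp => by
          rw [PySem.List.mem_enumerate_iff] at hp
          rcases hp with ⟨k, hk, rfl⟩
          have hmem := (hLmem L[k]).mp (List.getElem_mem hk)
          simp only [hRlen]
          exact ⟨hmem.2.1, by omega⟩)
        (by rw [PySem.List.map_snd_enumerate]; exact hLnd) j]
    by_cases hjL : (j : Int) ∈ L
    · rw [pvFind_enumerate L 0 (j : Int) hLpw hjL]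
      have hjle : (j : Int) ≤ maxglev := ((hLmem _).mp hjL).2.2
      rw [List.getElem?_map, PySem.List.getElem?_pyRange_one,
          if_pos (show j < ((maxglev + 1) - 0).toNat by omega)]
      simp [hjL]
    · have hfind : (PySem.List.enumerate L 0).find? (fun p => p.2 == (j : Int)) = none := by
        rw [List.find?_eq_none]
        intro p hp
        rw [PySem.List.mem_enumerate_iff] at hp
        rcases hp with ⟨k, hk, rfl⟩
        simp only [beq_iff_eq]
        intro hpe
        exact hjL (hpe ▸ List.getElem_mem hk)
      rw [hfind]
      rw [List.getElem?_map, PySem.List.getElem?_pyRange_one]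
      by_cases hjn : j < n
      · rw [if_pos (show j < ((maxglev + 1) - 0).toNat by omega),
            List.getElem?_eq_getElem (by simpa using hjn)]
        simp [hjL]
      · rw [if_neg (show ¬ j < ((maxglev + 1) - 0).toNat by omega),
            List.getElem?_eq_none (by simpa using hjn)]
        simp

-- ===== VERDICT (by name: the statement is the Claim_ definition above) =====
theorem reorder_gridcolorlist_spec : Claim_equal_reorder_gridcolorlist := by
  intro g m pl _
  exact reorder_gridcolorlist_spec' g m pl
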